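-- pv_equiv track=rewrite | github.com/papibe/advent-of-code-2015 | python/day20/part2.py | solution
-- ===== SOURCE A (Python) =====
-- from typing import Dict, List, Set
--
-- def sieve_of_eratosthenes(limit: int) -> List[int]:
--     """
--     Finds all prime numbers up to 'limit' using the Sieve of Eratosthenes.
--     """
--     # Create a boolean array "prime[0..limit]" and initialize all entries it as true.
--     # A value prime[i] will be false if i is not a prime, else true.
--     prime = [True] * (limit + 1)
--
--     p = 2
--     while (p * p <= limit):
--         # If prime[p] is still true, then it is a prime
--         if prime[p]:
--             # Update all multiples of p as not prime
--             for i in range(p * p, limit + 1, p):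
--                 prime[i] = False
--         p += 1
--
--     # Collect all prime numbers
--     primes = []
--     for p in range(2, limit + 1):
--         if prime[p]:
--             primes.append(p)
--     return primes
--
-- def get_prime_factors(primes: List[int], n: int) -> List[int]:
--     prime_factors: List[int] = []
--
--     for p in primes:
--         if p * p > n:
--             break
--         times: int = 0
--         while n % p == 0:
--             times += 1
--             n //= p
--         if times > 0:
--             prime_factors.append([p, times])
--     if n > 1:
--         prime_factors.append([n, 1])
--
--     return prime_factors
--
-- def get_divisors(prime_factors: List[int], n: int) -> Set[int]:
--     divisors: List[int] = []
--
--     def _get_divisors(index: int, divisor: int) -> None: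
--         if index == len(prime_factors):
--             if divisor * 50 >= n:
--                 divisors.append(divisor)
--             return
--
--         prime: int = prime_factors[index][0]
--         exponent: int = prime_factors[index][1]
--         value: int = 1
--         for _ in range(exponent + 1):
--             _get_divisors(index + 1, divisor*value)
--             value *= prime
--
--     _get_divisors(0, 1)
--     return divisors
--
-- def get_presents(primes: List[int], n: int) -> int:
--     prime_factors: List[int] = get_prime_factors(primes, n)
--
--     presents: int = 11 * sum(get_divisors(prime_factors, n))
--
--     return presents
--
-- def solution(goal: int) -> int:
--     house_number: int = 1
--     presents: int = 10
--     primes: List[int] = sieve_of_eratosthenes(goal)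
--
--     while presents < goal:
--         house_number += 1
--         presents = get_presents(primes, house_number)
--
--     return house_number
-- ===== SOURCE B (Python) =====
-- def solution(goal: int) -> int:
--     # Scan houses from 1; house n receives 11 * sum of n//q over the (at most 50)
--     # cofactors q = n/d of divisors d with d*50 >= n, i.e. q in 1..50 dividing n.
--     house = 1
--     while True:
--         presents = 0
--         for q in range(1, 51):
--             if house % q == 0:
--                 presents += house // q
--         presents *= 11
--         if presents >= goal:
--             return house
--         house += 1
-- ===== Notes on version B (the rewrite author's own statement) =====
-- stated objective: faster
-- what changed: Replaces the prime sieve + per-house trial-division factorization + recursive divisor enumeration by a direct scan from house 1 where each house's presents are summed over the at most 50 cofactors q in 1..50 with house % q == 0 (d*50 >= house iff house/d <= 50), with no precomputation.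
-- intended difference: For goal = 11 A returns house 2 because its loop is seeded with a fake presents=10 and never evaluates house 1, while B returns house 1, the intended answer since house 1 receives 11 presents >= 11. — e.g. on solution(11): A returns 2, B returns 1
import Mathlib
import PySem

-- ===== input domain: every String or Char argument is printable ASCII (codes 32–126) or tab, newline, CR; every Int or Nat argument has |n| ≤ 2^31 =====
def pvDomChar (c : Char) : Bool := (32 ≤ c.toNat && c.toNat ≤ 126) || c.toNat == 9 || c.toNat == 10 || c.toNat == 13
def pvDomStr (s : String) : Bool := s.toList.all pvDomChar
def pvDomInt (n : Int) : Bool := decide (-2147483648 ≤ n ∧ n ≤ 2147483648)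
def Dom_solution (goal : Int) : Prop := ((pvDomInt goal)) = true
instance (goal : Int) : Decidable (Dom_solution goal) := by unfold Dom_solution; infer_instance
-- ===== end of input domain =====

-- B replaces A's prime sieve + per-house trial-division factorization + recursive divisor
-- enumeration by a direct scan from house 1 summing over the ≤ 50 cofactors q = house/d
-- (d*50 ≥ house iff house/d ≤ 50); a timing run measured B faster (constant factor).

-- ===== PORT A =====
-- inner marking loop: for i in range(p*p, limit+1, p): prime[i] = False
-- (pySetD is exact here: every index produced by the range is nonnegative and < len(prime))
def sieveMark (pr : Array Bool) (p limit : Int) : Array Bool :=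
  (PySem.List.pyRange (p*p) (limit+1) p).foldl (fun acc i => acc.setIfInBounds i.toNat false) pr

-- while p*p <= limit loop; fuel only totalizes (the loop runs < fuel steps, p increments)
def sieveLoop : Nat → Int → Int → Array Bool → Array Bool
  | 0, _, _, pr => pr
  | fuel+1, p, limit, pr =>
    if p * p ≤ limit then
      -- prime[p] read: in range whenever the guard holds (p ≥ 2, p*p ≤ limit), so getD is exact
      let pr' := if pr.getD p.toNat false then sieveMark pr p limit else pr
      sieveLoop fuel (p+1) limit pr'
    else pr

def sieve (limit : Int) : List Int :=
  let pr := sieveLoop (limit.toNat + 2) 2 limit (Array.replicate (limit+1).toNat true)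
  -- prime[p] read: every p the range yields has 2 ≤ p ≤ limit, in range, so getD is exact
  (PySem.List.pyRange 2 (limit+1) 1).foldl
    (fun acc p => if pr.getD p.toNat false then acc ++ [p] else acc) []

-- while n % p == 0: times += 1; n //= p   (fuel totalizes; n shrinks every step for p ≥ 2)
def divLoop : Nat → Int → Int → Int → Int × Int
  | 0, _, n, times => (times, n)
  | fuel+1, p, n, times =>
    if PySem.Int.mod n p == 0 then divLoop fuel p (PySem.Int.floordiv n p) (times+1)
    else (times, n)

-- the for p in primes loop of get_prime_factors, with its break on p*p > n
def factorLoop : List Int → Int → List (Int × Int) → List (Int × Int) × Int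
  | [], n, acc => (acc, n)
  | p :: ps, n, acc =>
    if p * p > n then (acc, n)
    else
      let r := divLoop (n.toNat + 1) p n 0
      factorLoop ps r.2 (if r.1 > 0 then acc ++ [(p, r.1)] else acc)

def getPrimeFactors (primes : List Int) (n : Int) : List (Int × Int) :=
  let r := factorLoop primes n []
  if r.2 > 1 then r.1 ++ [(r.2, 1)] else r.1

-- _get_divisors: the shared 'divisors' accumulator is threaded as 'acc'; the inner
-- 'for _ in range(exponent + 1)' carries (accumulator, value) with value *= prime each turn
def enumDiv (n : Int) : List (Int × Int) → Int → List Int → List Int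
  | [], d, acc => if d * 50 ≥ n then acc ++ [d] else acc
  | (p, e) :: rest, d, acc =>
    ((PySem.List.pyRange 0 (e+1) 1).foldl
      (fun (st : List Int × Int) _ => (enumDiv n rest (d * st.2) st.1, st.2 * p)) (acc, 1)).1

def getPresents (primes : List Int) (n : Int) : Int :=
  11 * (enumDiv n (getPrimeFactors primes n) 1 []).sum

-- while presents < goal loop (fuel totalizes; presents of house h is ≥ 11*h, so the
-- loop stops before the fuel is consumed — proved below)
def solveLoopA (primes : List Int) (goal : Int) : Nat → Int → Int → Int
  | 0, house, _ => house
  | fuel+1, house, presents =>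
    if presents < goal then
      solveLoopA primes goal fuel (house+1) (getPresents primes (house+1))
    else house

def solution (goal : Int) : Int :=
  solveLoopA (sieve goal) goal (goal.toNat + 1) 1 10

-- ===== PORT B =====
-- presents of a house: 11 * sum of house//q over q in range(1, 51) with house % q == 0
def presentsB (house : Int) : Int :=
  11 * ((PySem.List.pyRange 1 51 1).foldl
    (fun acc q => if PySem.Int.mod house q == 0 then acc + PySem.Int.floordiv house q else acc) 0)

-- while True loop of B (fuel totalizes; B stops at a house ≤ max(1, goal) — proved below)
def solveLoopB (goal : Int) : Nat → Int → Int
  | 0, house => house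
  | fuel+1, house =>
    if presentsB house ≥ goal then house else solveLoopB goal fuel (house+1)

def solution_alt (goal : Int) : Int := solveLoopB goal (goal.toNat + 2) 1

-- ===== PRECONDITION & SPEC =====
-- For goal = 11 A returns house 2 because its loop is seeded with a fake presents=10 and never
-- evaluates house 1, while B returns house 1, the intended answer since house 1 receives
-- 11 presents ≥ 11.
def D_solution (goal : Int) : Prop := goal = 11
instance (goal : Int) : Decidable (D_solution goal) := by unfold D_solution; infer_instance

def Spec_solution (goal : Int) (out : Int) : Prop := ¬ D_solution goal → out = solution_alt goal
instance (goal : Int) (out : Int) : Decidable (Spec_solution goal out) := by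
  unfold Spec_solution; infer_instance

def pvDiffWitness_solution : Int := 11
def pvDiffWitnessOut_solution : Int × Int := (2, 1)

-- ===== CLAIM (what is proved, stated in full; the proofs are below) =====
def Claim_unchanged_solution : Prop := ∀ (goal : Int), Dom_solution goal → Spec_solution goal (solution goal)
def Claim_changed_solution : Prop := Dom_solution (pvDiffWitness_solution) ∧ D_solution (pvDiffWitness_solution) ∧ solution (pvDiffWitness_solution) = pvDiffWitnessOut_solution.1 ∧ solution_alt (pvDiffWitness_solution) = pvDiffWitnessOut_solution.2 ∧ pvDiffWitnessOut_solution.1 ≠ pvDiffWitnessOut_solution.2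
def Claim_exact_solution : Prop := ∀ (goal : Int), Dom_solution goal → D_solution goal → solution goal ≠ solution_alt goal

-- ===== LEMMAS AND PROOFS =====

-- ---- generic fold shape of B's inner loop ----
theorem foldl_if_add (f : Int → Int) (c : Int → Bool) :
    ∀ (l : List Int) (init : Int),
      l.foldl (fun acc q => if c q then acc + f q else acc) init
        = init + (l.map (fun q => if c q then f q else 0)).sum := by
  intro l
  induction l with
  | nil => intro init; simp
  | cons q l ih =>
    intro init
    by_cases hc : c q = true <;> simp [hc, ih] <;> ring

-- ---- B's presents = 11 * (sum of divisors d of m with m ≤ 50*d) ----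
theorem cofactor_sum (m : ℕ) (hm : 1 ≤ m) :
    ∑ i ∈ Finset.range 50, (if (i+1) ∣ m then m / (i+1) else 0)
      = ∑ d ∈ m.divisors.filter (fun d => m ≤ 50*d), d := by
  have hm0 : m ≠ 0 := by omega
  rw [← Finset.sum_filter]
  refine Finset.sum_nbij' (i := fun q => m / (q+1)) (j := fun d => m / d - 1) ?_ ?_ ?_ ?_ ?_
  · intro a ha
    simp only [Finset.mem_filter, Finset.mem_range] at ha
    obtain ⟨ha50, hdvd⟩ := ha
    have hmul : (a+1) * (m / (a+1)) = m := Nat.mul_div_cancel' hdvd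
    simp only [Finset.mem_filter, Nat.mem_divisors]
    refine ⟨⟨Nat.div_dvd_of_dvd hdvd, hm0⟩, ?_⟩
    calc m = (a+1) * (m / (a+1)) := hmul.symm
    _ ≤ 50 * (m / (a+1)) := Nat.mul_le_mul_right _ (by omega)
  · intro d hd
    simp only [Finset.mem_filter, Nat.mem_divisors] at hd
    obtain ⟨⟨hdvd, _⟩, hle⟩ := hd
    have hdpos : 0 < d := Nat.pos_of_dvd_of_pos hdvd (by omega)
    have h1 : 1 ≤ m / d := (Nat.one_le_div_iff hdpos).mpr (Nat.le_of_dvd (by omega) hdvd)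
    have h50 : m / d ≤ 50 := by
      have : m / d < 51 := (Nat.div_lt_iff_lt_mul hdpos).mpr (by omega)
      omega
    simp only [Finset.mem_filter, Finset.mem_range]
    constructor
    · omega
    · have heq : m / d - 1 + 1 = m / d := by omega
      rw [heq]
      exact Nat.div_dvd_of_dvd hdvd
  · intro a ha
    simp only [Finset.mem_filter, Finset.mem_range] at ha
    show m / (m / (a+1)) - 1 = a
    have := Nat.div_div_self ha.2 hm0
    omega
  · intro d hd
    simp only [Finset.mem_filter, Nat.mem_divisors] at hd
    obtain ⟨⟨hdvd, _⟩, hle⟩ := hd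
    have hdpos : 0 < d := Nat.pos_of_dvd_of_pos hdvd (by omega)
    have h1 : 1 ≤ m / d := (Nat.one_le_div_iff hdpos).mpr (Nat.le_of_dvd (by omega) hdvd)
    have heq : m / d - 1 + 1 = m / d := by omega
    show m / (m / d - 1 + 1) = d
    rw [heq]
    exact Nat.div_div_self hdvd hm0
  · intro a _; rfl

theorem presentsB_spec (x : Int) (hx : 1 ≤ x) :
    presentsB x = 11 * ((∑ d ∈ x.toNat.divisors.filter (fun d => x.toNat ≤ 50*d), d : ℕ) : Int) := by
  obtain ⟨m, rfl⟩ : ∃ m : ℕ, x = (m:Int) := ⟨x.toNat, by omega⟩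
  have hm : 1 ≤ m := by exact_mod_cast hx
  rw [presentsB, foldl_if_add (PySem.Int.floordiv (m:Int)) (fun q => PySem.Int.mod (m:Int) q == 0),
      zero_add]
  have hcast : ∀ k : ℕ,
      (if PySem.Int.mod (m:Int) (1 + (k:Int)) == 0 then PySem.Int.floordiv (m:Int) (1 + (k:Int)) else 0)
        = ((if (k+1) ∣ m then m / (k+1) else 0 : ℕ) : Int) := by
    intro k
    have h1 : (1 + (k:Int)) = ((k+1 : ℕ) : Int) := by push_cast; ring
    rw [h1]
    by_cases hd : (k+1) ∣ m
    · have hb : (PySem.Int.mod (m:Int) ((k+1:ℕ):Int) == 0) = true := by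
        simp only [beq_iff_eq, PySem.Int.mod_eq_zero_iff_dvd]
        exact_mod_cast hd
      simp [hb, hd, PySem.Int.floordiv_natCast]
      intro h; exact absurd (by exact_mod_cast hd) h
    · have hb : (PySem.Int.mod (m:Int) ((k+1:ℕ):Int) == 0) = false := by
        simp only [beq_eq_false_iff_ne, ne_eq, PySem.Int.mod_eq_zero_iff_dvd]
        exact_mod_cast hd
      simp [hb, hd]
      intro h; exact absurd (by exact_mod_cast h) hd
  have hlist : (PySem.List.pyRange 1 51 1).map
        (fun q => if PySem.Int.mod (m:Int) q == 0 then PySem.Int.floordiv (m:Int) q else 0)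
      = (List.range 50).map (fun k : ℕ => ((if (k+1) ∣ m then m / (k+1) else 0 : ℕ) : Int)) := by
    rw [PySem.List.pyRange_one]
    norm_num [List.map_map]
    refine List.map_congr_left ?_
    intro k _
    simpa using hcast k
  rw [hlist]
  have : (List.range 50).map (fun k : ℕ => ((if (k+1) ∣ m then m / (k+1) else 0 : ℕ) : Int))
       = ((List.range 50).map (fun k => (if (k+1) ∣ m then m / (k+1) else 0 : ℕ))).map (fun n : ℕ => (n:Int)) := by
    rw [List.map_map]; rfl
  rw [this, ← Nat.cast_list_sum]
  have hrange : ((List.range 50).map (fun k => (if (k+1) ∣ m then m / (k+1) else 0 : ℕ))).sum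
      = ∑ i ∈ Finset.range 50, (if (i+1) ∣ m then m / (i+1) else 0) := rfl
  rw [hrange, cofactor_sum m hm]
  rfl

theorem presB_lb (x : Int) (hx : 1 ≤ x) : 11 * x ≤ presentsB x := by
  rw [presentsB_spec x hx]
  have hmem : x.toNat ∈ x.toNat.divisors.filter (fun d => x.toNat ≤ 50*d) := by
    simp only [Finset.mem_filter, Nat.mem_divisors]
    refine ⟨⟨dvd_rfl, by omega⟩, by omega⟩
  have := Finset.single_le_sum (f := fun d => d) (fun i _ => Nat.zero_le i) hmem
  have hc : (x.toNat : Int) = x := by omega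
  nlinarith [this, Int.ofNat_le.mpr this]

-- ---- sieve: the collected list is a filter of the range, sorted, entries ≥ 2, and
-- ---- contains every prime ≤ limit (marking only ever touches composite indices) ----
theorem mark_preserve (j : ℕ) :
    ∀ (l : List Int) (pr : Array Bool), (∀ i ∈ l, 0 ≤ i ∧ i ≠ (j:Int)) →
      (l.foldl (fun acc i => acc.setIfInBounds i.toNat false) pr).getD j false
        = pr.getD j false := by
  intro l
  induction l with
  | nil => intro pr _; rfl
  | cons i l ih =>
    intro pr h
    have hi := h i (by simp)
    have hrest : ∀ i' ∈ l, 0 ≤ i' ∧ i' ≠ (j:Int) := fun i' hi' => h i' (by simp [hi'])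
    rw [List.foldl_cons, ih _ hrest]
    have hne : i.toNat ≠ j := by omega
    simp only [Array.getD_eq_getD_getElem?]
    rw [Array.getElem?_setIfInBounds_ne hne]

theorem sieveLoop_preserve (limit : Int) :
    ∀ (fuel : ℕ) (p : Int) (pr : Array Bool), 2 ≤ p →
      (∀ q : ℕ, q.Prime → (q:Int) ≤ limit → pr.getD q false = true) →
      (∀ q : ℕ, q.Prime → (q:Int) ≤ limit →
        (sieveLoop fuel p limit pr).getD q false = true) := by
  intro fuel
  induction fuel with
  | zero => intro p pr _ hpr; exact hpr
  | succ fuel ih =>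
    intro p pr hp hpr q hq hle
    rw [sieveLoop]
    by_cases hguard : p * p ≤ limit
    · rw [if_pos hguard]
      have hmark : ∀ q' : ℕ, q'.Prime → (q':Int) ≤ limit →
          (sieveMark pr p limit).getD q' false = true := by
        intro q' hq' hle'
        rw [sieveMark, mark_preserve]
        · exact hpr q' hq' hle'
        · intro i hi
          rw [PySem.List.mem_pyRange_iff_of_pos (by omega)] at hi
          obtain ⟨hlo, hhi, hdvd⟩ := hi
          have hpi : p ∣ i := by simpa using hdvd.add (Dvd.intro p rfl)
          have hpp : (0:Int) < p * p := by positivity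
          constructor
          · omega
          · intro hij
            subst hij
            -- p divides q', q' prime, p ≥ 2, p*p ≤ i = q' so p < q': contradiction
            have hpq : p ∣ (q':Int) := hpi
            have : p.toNat ∣ q' := by
              have h0 : (0:Int) ≤ p := by omega
              exact Int.ofNat_dvd.mp (by rwa [Int.toNat_of_nonneg h0])
            have := (Nat.Prime.eq_one_or_self_of_dvd hq' _ this).resolve_left (by omega)
            have hpq' : p = (q':Int) := by omega
            nlinarith
      by_cases hflag : pr.getD p.toNat false = true
      · simp only [hflag, if_true]
        exact ih (p+1) _ (by omega) hmark q hq hle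
      · simp only [hflag]
        simp only [Bool.not_eq_true] at hflag
        simp only [hflag, Bool.false_eq_true, if_false]
        exact ih (p+1) pr (by omega) hpr q hq hle
    · rw [if_neg hguard]
      exact hpr q hq hle

theorem sieve_eq_filter (limit : Int) :
    sieve limit = (PySem.List.pyRange 2 (limit+1) 1).filter
      (fun p => (sieveLoop (limit.toNat + 2) 2 limit
        (Array.replicate (limit+1).toNat true)).getD p.toNat false) := by
  rw [sieve]
  exact (PySem.List.foldl_append_if _ id _ []).trans (by simp)

theorem sieve_complete (limit : Int) (q : ℕ) (hq : q.Prime) (hle : (q:Int) ≤ limit) :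
    (q:Int) ∈ sieve limit := by
  rw [sieve_eq_filter, List.mem_filter]
  constructor
  · rw [PySem.List.mem_pyRange_one]
    have := hq.two_le
    constructor
    · exact_mod_cast this
    · omega
  · apply sieveLoop_preserve limit _ 2 _ (by omega) _ q hq hle
    intro q' hq' hle'
    have h2 : 2 ≤ q' := hq'.two_le
    have hlt : q' < (limit+1).toNat := by omega
    simp [Array.getD_eq_getD_getElem?, Array.getElem?_replicate, hlt]

theorem sieve_sorted (limit : Int) : (sieve limit).Pairwise (· < ·) := by
  rw [sieve_eq_filter]
  exact (PySem.List.pairwise_lt_pyRange_one 2 (limit+1)).sublist List.filter_sublist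

theorem sieve_ge_two (limit : Int) : ∀ r ∈ sieve limit, 2 ≤ r := by
  intro r hr
  rw [sieve_eq_filter, List.mem_filter] at hr
  exact (PySem.List.mem_pyRange_one.mp hr.1).1

-- ---- trial division ----
theorem divLoop_spec :
    ∀ (fuel : ℕ) (p n t : Int), 2 ≤ p → 1 ≤ n → n.toNat < fuel →
      ∃ (k : ℕ) (n' : Int), divLoop fuel p n t = (t + (k:Int), n') ∧
        n = p^k * n' ∧ ¬ (p ∣ n') ∧ 1 ≤ n' := by
  intro fuel
  induction fuel with
  | zero => intro p n t hp hn hf; omega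
  | succ fuel ih =>
    intro p n t hp hn hf
    by_cases hdvd : p ∣ n
    · have hmod : (PySem.Int.mod n p == 0) = true := by
        simp only [beq_iff_eq, PySem.Int.mod_eq_zero_iff_dvd]; exact hdvd
      have hfd : PySem.Int.floordiv n p = n / p := PySem.Int.floordiv_eq_ediv_of_pos (by omega)
      have hmul : p * (n / p) = n := Int.mul_ediv_cancel' hdvd
      have hq1 : 1 ≤ n / p := by nlinarith [hmul]
      have hlt : n / p < n := by nlinarith [hmul]
      obtain ⟨k, n', heq, hprod, hnd, hn'⟩ := ih p (n / p) (t+1) hp hq1 (by omega)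
      refine ⟨k+1, n', ?_, ?_, hnd, hn'⟩
      · rw [divLoop, if_pos hmod, hfd, heq]
        rw [Prod.mk.injEq]
        refine ⟨by push_cast; ring, rfl⟩
      · rw [← hmul, hprod]; ring
    · have hmod : (PySem.Int.mod n p == 0) = false := by
        simp only [beq_eq_false_iff_ne, ne_eq, PySem.Int.mod_eq_zero_iff_dvd]; exact hdvd
      exact ⟨0, n, by rw [divLoop, if_neg (by simp [hmod])]; simp, by simp, hdvd, hn⟩

theorem factorLoop_acc :
    ∀ (ps : List Int) (n : Int) (acc : List (Int × Int)),
      factorLoop ps n acc = (acc ++ (factorLoop ps n []).1, (factorLoop ps n []).2) := by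
  intro ps
  induction ps with
  | nil => intro n acc; simp [factorLoop]
  | cons p ps ih =>
    intro n acc
    rw [factorLoop, factorLoop]
    by_cases hg : p * p > n
    · simp [hg]
    · rw [if_neg hg, if_neg hg]
      rw [ih _ (if (divLoop (n.toNat + 1) p n 0).1 > 0 then acc ++ [(p, (divLoop (n.toNat + 1) p n 0).1)] else acc),
          ih _ (if (divLoop (n.toNat + 1) p n 0).1 > 0 then [] ++ [(p, (divLoop (n.toNat + 1) p n 0).1)] else [])]
      by_cases ht : (divLoop (n.toNat + 1) p n 0).1 > 0 <;> simp [ht]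

theorem factorLoop_spec :
    ∀ (ps : List Int) (n : Int),
      ps.Pairwise (· < ·) → (∀ r ∈ ps, 2 ≤ r) → 1 ≤ n →
      (∀ q : ℕ, q.Prime → (q:Int) ∣ n → (q:Int) ∈ ps) →
      ∃ (F : List (ℕ × ℕ)) (n' : ℕ),
        factorLoop ps n [] = (F.map (fun pe => ((pe.1:Int), (pe.2:Int))), (n':Int)) ∧
        (∀ pe ∈ F, pe.1.Prime ∧ 1 ≤ pe.2) ∧
        (F.map Prod.fst).Pairwise (· < ·) ∧
        (F.map (fun pe => pe.1 ^ pe.2)).prod * n' = n.toNat ∧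
        1 ≤ n' ∧
        (∀ pe ∈ F, (pe.1:Int) ∈ ps) ∧
        (n' = 1 ∨ (n'.Prime ∧ ∀ pe ∈ F, pe.1 < n')) := by
  intro ps
  induction ps with
  | nil =>
    intro n _ _ hn hcompl
    have hn1 : n = 1 := by
      by_contra hne
      have h2 : 2 ≤ n := by omega
      have hpf : (n.toNat).minFac.Prime := Nat.minFac_prime (by omega)
      have hdvd : ((n.toNat).minFac : Int) ∣ n := by
        have : (n.toNat).minFac ∣ n.toNat := Nat.minFac_dvd _
        have := Int.ofNat_dvd.mpr this
        rwa [Int.toNat_of_nonneg (by omega)] at this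
      exact absurd (hcompl _ hpf hdvd) (List.not_mem_nil)
    subst hn1
    exact ⟨[], 1, by simp [factorLoop], by simp, by simp, by simp, by omega, by simp, Or.inl rfl⟩
  | cons p ps ih =>
    intro n hpair hge2 hn hcompl
    have hp2 : 2 ≤ p := hge2 p (by simp)
    have hplt : ∀ r ∈ ps, p < r := fun r hr => (List.pairwise_cons.mp hpair).1 r hr
    by_cases hbreak : p * p > n
    · -- break: remainder is 1 or prime
      refine ⟨[], n.toNat, ?_, by simp, by simp, by simp, by omega, by simp, ?_⟩
      · rw [factorLoop, if_pos hbreak]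
        simp [Int.toNat_of_nonneg (by omega : (0:Int) ≤ n)]
      · by_cases hone : n = 1
        · subst hone; exact Or.inl rfl
        · right
          have h2 : 2 ≤ n := by omega
          constructor
          · by_contra hnp
            set a := (n.toNat).minFac with ha
            have hap : a.Prime := Nat.minFac_prime (by omega)
            have hadvd : (a : Int) ∣ n := by
              have := Int.ofNat_dvd.mpr (Nat.minFac_dvd n.toNat)
              rwa [Int.toNat_of_nonneg (by omega)] at this
            have hmem := hcompl a hap hadvd
            have hage : p ≤ (a:Int) := by
              rcases List.mem_cons.mp hmem with h | h
              · omega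
              · exact le_of_lt (hplt _ h)
            have hsq : a^2 ≤ n.toNat := Nat.minFac_sq_le_self (by omega) hnp
            have : ((a:Int))^2 ≤ n := by
              have := Int.ofNat_le.mpr hsq
              push_cast at this
              rwa [Int.toNat_of_nonneg (by omega)] at this
            nlinarith
          · simp
    · rw [not_lt] at hbreak
      obtain ⟨k, n₂, hdeq, hprod, hnd, hn₂⟩ :=
        divLoop_spec (n.toNat + 1) p n 0 hp2 hn (by omega)
      have hn₂dvd : n₂ ∣ n := Dvd.intro_left _ hprod.symm
      have hcompl₂ : ∀ q : ℕ, q.Prime → (q:Int) ∣ n₂ → (q:Int) ∈ ps := by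
        intro q hq hqdvd
        have hqn : (q:Int) ∣ n := hqdvd.trans hn₂dvd
        rcases List.mem_cons.mp (hcompl q hq hqn) with h | h
        · exact absurd (by rwa [h] at hqdvd) hnd
        · exact h
      obtain ⟨F', n', hfeq, hFprime, hFpair, hFprod, hn'1, hFmem, hlast⟩ :=
        ih n₂ (List.pairwise_cons.mp hpair).2 (fun r hr => hge2 r (by simp [hr])) hn₂ hcompl₂
      by_cases hk : k = 0
      · -- p did not divide n; factor list unchanged
        subst hk
        have hn₂n : n₂ = n := by rw [hprod]; ring
        refine ⟨F', n', ?_, hFprime, hFpair, ?_, hn'1, ?_, ?_⟩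
        · rw [factorLoop, if_neg (not_lt.mpr hbreak)]
          show factorLoop ps (divLoop (n.toNat + 1) p n 0).2
            (if (divLoop (n.toNat + 1) p n 0).1 > 0 then [] ++ [(p, (divLoop (n.toNat + 1) p n 0).1)] else []) = _
          rw [hdeq]
          simp only [show ¬((0:Int) + (0:ℕ) > 0) by simp, if_neg, ite_false]
          rw [← hn₂n] at *
          simpa using hfeq
        · rw [← hn₂n] at *; exact hFprod
        · intro pe hpe; exact List.mem_cons_of_mem _ (hFmem pe hpe)
        · rcases hlast with h | ⟨hpr, hlt⟩
          · exact Or.inl h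
          · exact Or.inr ⟨hpr, hlt⟩
      · -- p divides n with multiplicity k ≥ 1: p is prime and is appended
        have hk1 : 1 ≤ k := by omega
        have hpdvd : p ∣ n := by
          rw [hprod]
          exact Dvd.dvd.mul_right (dvd_pow_self p (by omega)) n₂
        have hpprime : p.toNat.Prime := by
          by_contra hnp
          set a := p.toNat.minFac with ha
          have hap : a.Prime := Nat.minFac_prime (by omega)
          have hadvd : (a:Int) ∣ p := by
            have := Int.ofNat_dvd.mpr (Nat.minFac_dvd p.toNat)
            rwa [Int.toNat_of_nonneg (by omega)] at this
          have halt : (a:Int) < p := by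
            have hle : a ≤ p.toNat := Nat.minFac_le (by omega)
            have hne : a ≠ p.toNat := fun h => hnp (h ▸ hap)
            omega
          have := hcompl a hap (hadvd.trans hpdvd)
          rcases List.mem_cons.mp this with h | h
          · omega
          · exact absurd (hplt _ h) (by omega)
        refine ⟨(p.toNat, k) :: F', n', ?_, ?_, ?_, ?_, hn'1, ?_, ?_⟩
        · rw [factorLoop, if_neg (not_lt.mpr hbreak)]
          show factorLoop ps (divLoop (n.toNat + 1) p n 0).2
            (if (divLoop (n.toNat + 1) p n 0).1 > 0 then [] ++ [(p, (divLoop (n.toNat + 1) p n 0).1)] else []) = _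
          rw [hdeq]
          simp only [zero_add]
          rw [if_pos (by exact_mod_cast Int.natCast_pos.mpr (by omega))]
          rw [factorLoop_acc, hfeq]
          have hpt : ((p.toNat : ℕ) : Int) = p := by omega
          simp only [List.map_cons, List.nil_append, List.singleton_append, hpt]
        · intro pe hpe
          rcases List.mem_cons.mp hpe with h | h
          · rw [h]; exact ⟨hpprime, hk1⟩
          · exact hFprime pe h
        · rw [List.map_cons]
          rw [List.pairwise_cons]
          refine ⟨?_, hFpair⟩
          intro b hb
          obtain ⟨pe, hpe, hpeb⟩ := List.mem_map.mp hb
          have := hplt _ (hFmem pe hpe)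
          omega
        · simp only [List.map_cons, List.prod_cons]
          have hcast : n.toNat = p.toNat ^ k * n₂.toNat := by
            have h1 : ((p.toNat ^ k * n₂.toNat : ℕ) : Int) = n := by
              push_cast
              rw [Int.toNat_of_nonneg (by omega : (0:Int) ≤ p),
                  Int.toNat_of_nonneg (by omega : (0:Int) ≤ n₂)]
              exact hprod.symm
            omega
          rw [hcast, ← hFprod]
          ring
        · intro pe hpe
          rcases List.mem_cons.mp hpe with h | h
          · rw [h]; simp only []
            have : (p.toNat : Int) = p := by omega
            rw [this]; exact List.mem_cons_self
          · exact List.mem_cons_of_mem _ (hFmem pe h)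
        · rcases hlast with h | ⟨hpr, hlt⟩
          · exact Or.inl h
          · right
            refine ⟨hpr, ?_⟩
            intro pe hpe
            rcases List.mem_cons.mp hpe with h | h
            · rw [h]
              have hn'dvd : (n' : Int) ∣ n₂ := by
                have : n' ∣ n₂.toNat := Dvd.intro_left _ hFprod
                have := Int.ofNat_dvd.mpr this
                rwa [Int.toNat_of_nonneg (by omega)] at this
              have := hcompl₂ n' hpr hn'dvd
              have := hplt _ this
              omega
            · exact hlt pe h

theorem getPrimeFactors_spec (goal x : Int) (h2 : 2 ≤ x) (hg : x ≤ goal) :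
    ∃ F : List (ℕ × ℕ),
      getPrimeFactors (sieve goal) x = F.map (fun pe => ((pe.1:Int), (pe.2:Int))) ∧
      (∀ pe ∈ F, pe.1.Prime ∧ 1 ≤ pe.2) ∧
      (F.map Prod.fst).Pairwise (· < ·) ∧
      (F.map (fun pe => pe.1 ^ pe.2)).prod = x.toNat := by
  have hcompl : ∀ q : ℕ, q.Prime → (q:Int) ∣ x → (q:Int) ∈ sieve goal := by
    intro q hq hdvd
    have hqle : (q:Int) ≤ x := Int.le_of_dvd (by omega) hdvd
    exact sieve_complete goal q hq (by omega)
  obtain ⟨F, n', heq, hFprime, hFpair, hFprod, hn'1, _, hlast⟩ :=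
    factorLoop_spec (sieve goal) x (sieve_sorted goal) (sieve_ge_two goal) (by omega) hcompl
  by_cases h1 : n' = 1
  · subst h1
    refine ⟨F, ?_, hFprime, hFpair, by simpa using hFprod⟩
    show (if (factorLoop (sieve goal) x []).2 > 1
      then (factorLoop (sieve goal) x []).1 ++ [((factorLoop (sieve goal) x []).2, 1)]
      else (factorLoop (sieve goal) x []).1) = _
    rw [heq]
    norm_num
  · obtain ⟨hpr, hlt⟩ := hlast.resolve_left h1
    have h2' : 2 ≤ n' := hpr.two_le
    refine ⟨F ++ [(n', 1)], ?_, ?_, ?_, ?_⟩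
    · show (if (factorLoop (sieve goal) x []).2 > 1
        then (factorLoop (sieve goal) x []).1 ++ [((factorLoop (sieve goal) x []).2, 1)]
        else (factorLoop (sieve goal) x []).1) = _
      rw [heq]
      split_ifs with hcond
      · rw [List.map_append]; norm_num
      · exact absurd (show ((1:Int) < ((n':ℕ):Int)) from by exact_mod_cast h2') hcond
    · intro pe hpe
      rcases List.mem_append.mp hpe with h | h
      · exact hFprime pe h
      · rw [List.mem_singleton.mp h]; exact ⟨hpr, le_refl 1⟩
    · rw [List.map_append, List.pairwise_append]
      refine ⟨hFpair, by simp, ?_⟩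
      intro a ha b hb
      obtain ⟨pe, hpe, rfl⟩ := List.mem_map.mp ha
      have : b = n' := by simpa using hb
      subst this
      exact hlt pe hpe
    · rw [List.map_append, List.prod_append]
      simp only [List.map_cons, List.map_nil, List.prod_cons, List.prod_nil, pow_one, mul_one]
      exact hFprod

-- ---- divisor enumeration ----
def natDivs : List (ℕ × ℕ) → List ℕ
  | [] => [1]
  | (p, e) :: rest => (List.range (e+1)).flatMap (fun a => (natDivs rest).map (fun d => p^a * d))

def castMul (d : Int) (t : ℕ) : Int := d * (t:Int)

theorem enumDiv_eq (x : Int) :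
    ∀ (F : List (ℕ × ℕ)) (d : Int) (acc : List Int),
      enumDiv x (F.map (fun pe => ((pe.1:Int), (pe.2:Int)))) d acc
        = acc ++ ((natDivs F).map (castMul d)).filter (fun v => decide (v * 50 ≥ x)) := by
  intro F
  induction F with
  | nil =>
    intro d acc
    show (if d * 50 ≥ x then acc ++ [d] else acc) = _
    by_cases h : d * 50 ≥ x <;> simp [natDivs, castMul, h]
  | cons pe rest ih =>
    obtain ⟨p, e⟩ := pe
    intro d acc
    show ((PySem.List.pyRange 0 ((e:Int)+1) 1).foldl
      (fun (st : List Int × Int) _ =>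
        (enumDiv x (rest.map (fun pe => ((pe.1:Int), (pe.2:Int)))) (d * st.2) st.1, st.2 * (p:Int))) (acc, 1)).1
      = acc ++ ((natDivs ((p,e) :: rest)).map (castMul d)).filter (fun v => decide (v * 50 ≥ x))
    have iter : ∀ (l : List Int) (acc : List Int) (v : Int),
        (l.foldl
          (fun (st : List Int × Int) _ =>
            (enumDiv x (rest.map (fun pe => ((pe.1:Int), (pe.2:Int)))) (d * st.2) st.1, st.2 * (p:Int))) (acc, v))
        = (acc ++ (List.range l.length).flatMap
            (fun a => ((natDivs rest).map (castMul (d * (v * (p:Int)^a)))).filter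
              (fun v => decide (v * 50 ≥ x))),
           v * (p:Int)^l.length) := by
      intro l
      induction l with
      | nil => intro acc v; simp
      | cons _ l ihl =>
        intro acc v
        rw [List.foldl_cons, ih (d * v) acc, ihl]
        rw [Prod.mk.injEq]
        refine ⟨?_, by rw [List.length_cons]; ring⟩
        rw [List.append_assoc]
        congr 1
        rw [List.length_cons, List.range_succ_eq_map, List.flatMap_cons, List.flatMap_map]
        congr 1
        · refine congrArg _ (List.map_congr_left ?_)
          intro t _
          simp only [castMul, pow_zero]
          ring
        · have hg : (fun a : ℕ =>
              ((natDivs rest).map (castMul (d * ((v * (p:Int)) * (p:Int)^a)))).filter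
                (fun v => decide (v * 50 ≥ x)))
              = (fun a : ℕ =>
              ((natDivs rest).map (castMul (d * (v * (p:Int)^(a+1))))).filter
                (fun v => decide (v * 50 ≥ x))) := by
            funext a
            refine congrArg _ (List.map_congr_left ?_)
            intro t _
            simp only [castMul, pow_succ]
            ring
          rw [hg]
    rw [iter]
    simp only [PySem.List.length_pyRange_one]
    have hlen : (((e:Int)+1) - 0).toNat = e + 1 := by omega
    rw [hlen]
    congr 1
    rw [natDivs]
    rw [List.map_flatMap, List.filter_flatMap]
    congr 1
    funext a
    rw [List.map_map]
    refine congrArg _ (List.map_congr_left ?_)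
    intro t _
    simp only [castMul, Function.comp]
    push_cast
    ring

theorem natDivs_spec :
    ∀ (F : List (ℕ × ℕ)), (∀ pe ∈ F, pe.1.Prime ∧ 1 ≤ pe.2) →
      (F.map Prod.fst).Pairwise (· < ·) →
      (natDivs F).Nodup ∧ (∀ t, t ∈ natDivs F ↔ t ∣ (F.map (fun pe => pe.1 ^ pe.2)).prod) := by
  intro F
  induction F with
  | nil =>
    intro _ _
    constructor
    · simp [natDivs]
    · intro t; simp [natDivs, Nat.dvd_one]
  | cons pe rest ih =>
    obtain ⟨p, e⟩ := pe
    intro hprime hpair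
    have hp : p.Prime := (hprime (p,e) (by simp)).1
    rw [List.map_cons] at hpair
    have hpairs := List.pairwise_cons.mp hpair
    obtain ⟨hnd, hmem⟩ := ih (fun q hq => hprime q (by simp [hq])) hpairs.2
    set M := (rest.map (fun pe => pe.1 ^ pe.2)).prod with hM
    have hMpos : 0 < M := by
      apply List.prod_pos
      intro a ha
      obtain ⟨q, hq, rfl⟩ := List.mem_map.mp ha
      exact pow_pos ((hprime q (by simp [hq])).1.pos) _
    have hpM : ¬ p ∣ M := by
      intro hdvd
      rw [hM] at hdvd
      obtain ⟨a, ha, hpa⟩ := (Prime.dvd_prod_iff hp.prime).mp hdvd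
      obtain ⟨q, hq, rfl⟩ := List.mem_map.mp ha
      have hq1 : q.1.Prime := (hprime q (by simp [hq])).1
      have heq : p = q.1 :=
        (Nat.prime_dvd_prime_iff_eq hp hq1).mp (Nat.Prime.dvd_of_dvd_pow hp hpa)
      have : p < q.1 := hpairs.1 q.1 (List.mem_map_of_mem hq)
      omega
    have hnodvd : ∀ d, d ∣ M → ¬ p ∣ d := fun d hd hpd => hpM (hpd.trans hd)
    have hprod : (List.map (fun pe => pe.1 ^ pe.2) ((p,e) :: rest)).prod = p^e * M := by
      rw [List.map_cons, List.prod_cons]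
    constructor
    · rw [natDivs, List.nodup_flatMap]
      constructor
      · intro a _
        exact hnd.map (fun t1 t2 h => Nat.eq_of_mul_eq_mul_left (pow_pos hp.pos a) h)
      · have hlt : (List.range (e+1)).Pairwise (· < ·) := List.pairwise_lt_range
        refine hlt.imp ?_
        intro a b hab
        intro t hta htb
        obtain ⟨d1, hd1, rfl⟩ := List.mem_map.mp hta
        obtain ⟨d2, hd2, heq2⟩ := List.mem_map.mp htb
        have hpd1 : ¬ p ∣ d1 := hnodvd d1 ((hmem d1).mp hd1)
        have hb : b = a + (b - a) := by omega
        rw [hb, pow_add, mul_assoc] at heq2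
        have : d1 = p ^ (b-a) * d2 := Nat.eq_of_mul_eq_mul_left (pow_pos hp.pos a) heq2.symm
        have hba : 1 ≤ b - a := by omega
        exact hpd1 (this ▸ Dvd.dvd.mul_right (dvd_pow_self p (by omega)) d2)
    · intro t
      rw [hprod, natDivs, List.mem_flatMap]
      constructor
      · rintro ⟨a, ha, hta⟩
        obtain ⟨d, hd, rfl⟩ := List.mem_map.mp hta
        have ha' : a ≤ e := by simpa using Nat.lt_succ_iff.mp (List.mem_range.mp ha)
        exact mul_dvd_mul (pow_dvd_pow p ha') ((hmem d).mp hd)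
      · intro hdvd
        have hne : p^e * M ≠ 0 := Nat.mul_ne_zero (pow_ne_zero _ hp.pos.ne') hMpos.ne'
        have ht : t ∈ (p^e * M).divisors := Nat.mem_divisors.mpr ⟨hdvd, hne⟩
        rw [Nat.divisors_mul, Finset.mem_mul] at ht
        obtain ⟨u, hu, v, hv, rfl⟩ := ht
        obtain ⟨a, ha, rfl⟩ := (Nat.dvd_prime_pow hp).mp (Nat.mem_divisors.mp hu).1
        refine ⟨a, List.mem_range.mpr (by omega), ?_⟩
        exact List.mem_map_of_mem ((hmem v).mpr (Nat.mem_divisors.mp hv).1)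

theorem getPresents_eq (goal x : Int) (h2 : 2 ≤ x) (hg : x ≤ goal) :
    getPresents (sieve goal) x = presentsB x := by
  obtain ⟨F, hFeq, hFprime, hFpair, hFprod⟩ := getPrimeFactors_spec goal x h2 hg
  obtain ⟨hnd, hmem⟩ := natDivs_spec F hFprime hFpair
  rw [getPresents, hFeq, enumDiv_eq x F 1 [], List.nil_append]
  have hone : (natDivs F).map (castMul 1) = (natDivs F).map (fun t : ℕ => (t:Int)) :=
    List.map_congr_left (fun t _ => by simp [castMul])
  rw [hone, List.filter_map]
  have hpred : ∀ t ∈ natDivs F,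
      ((fun v : Int => decide (v * 50 ≥ x)) ∘ (fun t : ℕ => (t:Int))) t
        = (fun t : ℕ => decide (x.toNat ≤ 50 * t)) t := by
    intro t _
    simp only [Function.comp, decide_eq_decide]
    omega
  rw [List.filter_congr hpred]
  rw [← Nat.cast_list_sum]
  have hndf := hnd.filter (fun t => decide (x.toNat ≤ 50 * t))
  have htf : ((natDivs F).filter (fun t => decide (x.toNat ≤ 50 * t))).toFinset
      = x.toNat.divisors.filter (fun d => x.toNat ≤ 50*d) := by
    ext t
    simp only [List.mem_toFinset, List.mem_filter, Finset.mem_filter, Nat.mem_divisors,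
      hmem t, hFprod, decide_eq_true_eq]
    constructor
    · rintro ⟨hdvd, hle⟩
      exact ⟨⟨hdvd, by omega⟩, hle⟩
    · rintro ⟨⟨hdvd, _⟩, hle⟩
      exact ⟨hdvd, hle⟩
  have hsum : ((natDivs F).filter (fun t => decide (x.toNat ≤ 50 * t))).sum
      = ∑ d ∈ x.toNat.divisors.filter (fun d => x.toNat ≤ 50*d), d := by
    have h1 := List.sum_toFinset (fun d : ℕ => d) hndf
    rw [htf] at h1
    rw [h1]
    simp
  rw [hsum, presentsB_spec x (by omega)]

-- ---- the two search loops agree ----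
theorem loops_eq (goal : Int) (hg : 12 ≤ goal) :
    ∀ (f1 : ℕ) (f2 : ℕ) (h : Int), 2 ≤ h → 11 * (h - 1) < goal →
      (goal - h).toNat < f1 → (goal - h).toNat < f2 →
      solveLoopA (sieve goal) goal f1 h (getPresents (sieve goal) h) = solveLoopB goal f2 h := by
  intro f1
  induction f1 with
  | zero => intro f2 h h2 hlt hf1 hf2; omega
  | succ f1 ih =>
    intro f2 h h2 hlt hf1 hf2
    have hhg : h ≤ goal := by omega
    obtain ⟨f2', rfl⟩ : ∃ f2', f2 = f2' + 1 := ⟨f2 - 1, by omega⟩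
    rw [solveLoopA, solveLoopB, getPresents_eq goal h h2 hhg]
    by_cases hstop : presentsB h < goal
    · rw [if_pos hstop, if_neg (by omega)]
      have hlb := presB_lb h (by omega)
      have h1g : 11 * h < goal := by omega
      exact ih f2' (h+1) (by omega) (by omega) (by omega) (by omega)
    · rw [if_neg hstop, if_pos (by omega)]

theorem presentsB_one : presentsB 1 = 11 := by decide

theorem solution_eq (goal : Int) (hne : goal ≠ 11) : solution goal = solution_alt goal := by
  by_cases hle : goal ≤ 10
  · rw [solution, solution_alt]
    rw [show goal.toNat + 1 = (goal.toNat) + 1 from rfl, solveLoopA]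
    rw [show goal.toNat + 2 = (goal.toNat + 1) + 1 from rfl, solveLoopB]
    rw [if_neg (by omega), if_pos (by rw [presentsB_one]; omega)]
  · have hg : 12 ≤ goal := by omega
    rw [solution, solution_alt]
    rw [show goal.toNat + 1 = (goal.toNat) + 1 from rfl, solveLoopA]
    rw [show goal.toNat + 2 = (goal.toNat + 1) + 1 from rfl, solveLoopB]
    rw [if_pos (by omega), if_neg (by rw [presentsB_one]; omega)]
    exact loops_eq goal hg goal.toNat (goal.toNat + 1) (1+1) (by omega) (by omega) (by omega) (by omega)

-- ===== VERDICT (by name: the statement is the Claim_ definition above) =====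
theorem solution_spec : Claim_unchanged_solution := by
  intro goal _
  exact fun hD => solution_eq goal hD

theorem solution_changed : Claim_changed_solution := by
  unfold Claim_changed_solution; decide

theorem solution_tight : Claim_exact_solution := by
  intro goal _ hD
  unfold D_solution at hD
  subst hD
  decide
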